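-- pv_equiv track=rewrite | github.com/anurag5398/DSA-Problems | DynamicProgramming/NdigitNumber.py | solve
-- ===== SOURCE A (Python) =====
-- def solve(A, B):
--     dp = [[0 for i in range(B+1)] for i in range(A)]
--     top = min(10, B+1)
--     for i in range(1, top):
--         dp[0][i] = 1
--
--     for i in range(1, A):
--         for j in range(1, B+1):
--             for k in range(0, 10):
--                 if j-k >= 0:
--                     dp[i][j] = (dp[i][j] + dp[i-1][j-k])%(10**9+7)
--
--     return dp[A-1][B]%(10**9+7)
-- ===== SOURCE B (Python) =====
-- def solve(A, B):
--     MOD = 10**9 + 7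
--     row = [0] * (B + 1)
--     for d in range(1, min(10, B + 1)):
--         row[d] = 1
--     for _ in range(A - 1):
--         new = [0] * (B + 1)
--         w = 0
--         for j in range(1, B + 1):
--             w += row[j]
--             if j >= 10:
--                 w -= row[j - 10]
--             new[j] = w % MOD
--         row = new
--     return row[B] % MOD
-- ===== Notes on version B (the rewrite author's own statement) =====
-- stated objective: faster
-- what changed: B replaces A's full A x (B+1) table and innermost loop over the 10 digits by a single rolling row updated with a sliding-window running sum (add the entering cell, subtract the cell that left the 10-wide window), removing the factor-10 inner loop.
-- outside the precondition, e.g. on solve(0, 5): A raises IndexError, B returns 1; on solve(3, -1): A raises IndexError, B raises IndexError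
import Mathlib
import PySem

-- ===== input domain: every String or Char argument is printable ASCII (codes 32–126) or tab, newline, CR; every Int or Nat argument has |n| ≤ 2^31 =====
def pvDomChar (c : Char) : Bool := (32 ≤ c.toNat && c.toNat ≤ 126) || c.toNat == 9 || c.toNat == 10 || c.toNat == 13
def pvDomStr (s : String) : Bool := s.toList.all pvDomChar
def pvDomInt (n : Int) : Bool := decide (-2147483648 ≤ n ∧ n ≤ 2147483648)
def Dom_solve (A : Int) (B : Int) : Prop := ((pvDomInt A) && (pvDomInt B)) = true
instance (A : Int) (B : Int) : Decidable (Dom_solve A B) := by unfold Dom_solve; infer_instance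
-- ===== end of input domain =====

-- B replaces A's inner loop over 10 digits by a sliding-window running sum over the previous row (O(A·B) vs O(10·A·B)); equivalence of return values proved on A ≥ 1, B ≥ 0 (elsewhere A raises IndexError).

-- ===== PORT A =====
def solve (A : Int) (B : Int) : Int :=
  let dp : List (List Int) :=
    (PySem.List.pyRange 0 A 1).map (fun _ => (PySem.List.pyRange 0 (B+1) 1).map (fun _ => (0:Int)))
  let top : Int := min 10 (B+1)
  let dp := (PySem.List.pyRange 1 top 1).foldl
    (fun dp i => PySem.List.pySetD dp 0 (PySem.List.pySetD (PySem.List.pyGetD dp 0 []) i 1)) dp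
  let dp := (PySem.List.pyRange 1 A 1).foldl (fun dp i =>
    (PySem.List.pyRange 1 (B+1) 1).foldl (fun dp j =>
      (PySem.List.pyRange 0 10 1).foldl (fun dp k =>
        if j - k ≥ 0 then
          PySem.List.pySetD dp i (PySem.List.pySetD (PySem.List.pyGetD dp i []) j
            (PySem.Int.mod (PySem.List.pyGetD (PySem.List.pyGetD dp i []) j 0
              + PySem.List.pyGetD (PySem.List.pyGetD dp (i-1) []) (j-k) 0) (10^9+7)))
        else dp) dp) dp) dp
  PySem.Int.mod (PySem.List.pyGetD (PySem.List.pyGetD dp (A-1) []) B 0) (10^9+7)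

-- ===== PORT B =====
def solve_alt (A : Int) (B : Int) : Int :=
  let M : Int := 10^9+7
  let row : List Int := PySem.List.pyRepeat [(0:Int)] (B+1)
  let row := (PySem.List.pyRange 1 (min 10 (B+1)) 1).foldl
    (fun row d => PySem.List.pySetD row d 1) row
  let row := (PySem.List.pyRange 0 (A-1) 1).foldl (fun row _ =>
    ((PySem.List.pyRange 1 (B+1) 1).foldl (fun (s : List Int × Int) j =>
      let w := s.2 + PySem.List.pyGetD row j 0
      let w := if j ≥ 10 then w - PySem.List.pyGetD row (j-10) 0 else w
      (PySem.List.pySetD s.1 j (PySem.Int.mod w M), w))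
      (PySem.List.pyRepeat [(0:Int)] (B+1), 0)).1) row
  PySem.Int.mod (PySem.List.pyGetD row B 0) M

-- ===== PRECONDITION & SPEC =====
-- Pre_: for A ≤ 0 or B < 0 the Python A raises IndexError (dp[A-1] on an empty table / dp[...][B] on an empty row).
def Pre_solve (A : Int) (B : Int) : Prop := 1 ≤ A ∧ 0 ≤ B
instance (A : Int) (B : Int) : Decidable (Pre_solve A B) := by unfold Pre_solve; infer_instance
def pvWitness_solve : Int × Int := (3, 7)

def Spec_solve (A : Int) (B : Int) (out : Int) : Prop := out = solve_alt A B
instance (A : Int) (B : Int) (out : Int) : Decidable (Spec_solve A B out) := by unfold Spec_solve; infer_instance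

-- ===== CLAIM (what is proved, stated in full; the proofs are below) =====
def Claim_equal_solve : Prop := ∀ (A : Int) (B : Int), Dom_solve A B → Pre_solve A B → Spec_solve A B (solve A B)

-- ===== LEMMAS AND PROOFS =====

def pvZ (b : Nat) : List Int := (List.range (b+1)).map (fun _ => (0:Int))
def pvBase (b : Nat) : List Int := (List.range (b+1)).map (fun j => if 1 ≤ j ∧ j < 10 then (1:Int) else 0)
def pvW (r : List Int) (n : Nat) : Int := ∑ k ∈ Finset.range 10, if k ≤ n then r.getD (n-k) 0 else 0
def pvStep (b : Nat) (r : List Int) : List Int :=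
  (List.range (b+1)).map (fun j => if 1 ≤ j ∧ j ≤ b then (pvW r j) % (10^9+7) else 0)
def pvRows (b i : Nat) : List Int := (pvStep b)^[i] (pvBase b)
def pvPre (r : List Int) (n : Nat) : Int := ∑ t ∈ Finset.range n, r.getD t 0
def pvTbl (a b i : Nat) : List (List Int) := (List.range a).map (fun t => if t ≤ i then pvRows b t else pvZ b)

theorem pv_setSelf {γ : Type} (l : List γ) (n : Nat) (d : γ) (h : n < l.length) :
    PySem.List.pySetD l (n:Int) (PySem.List.pyGetD l (n:Int) d) = l := by
  rw [PySem.List.pySetD_natCast, PySem.List.pyGetD_natCast, List.getD_eq_getElem l d h]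
  exact List.set_getElem_self h

theorem pv_loc1 {α γ : Type} (xs : List α) (n : Nat) (d : γ) (f : γ → α → γ) :
    ∀ (cur : List γ), n < cur.length →
    xs.foldl (fun c x => PySem.List.pySetD c (n:Int) (f (PySem.List.pyGetD c (n:Int) d) x)) cur
      = PySem.List.pySetD cur (n:Int) (xs.foldl f (PySem.List.pyGetD cur (n:Int) d)) := by
  induction xs with
  | nil => intro cur h; simpa using (pv_setSelf cur n d h).symm
  | cons x xs ih =>
    intro cur h
    simp only [List.foldl_cons]
    rw [ih _ (by rw [PySem.List.length_pySetD]; exact h)]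
    rw [PySem.List.pyGetD_pySetD_natCast _ _ _ _ _ h]
    simp only [PySem.List.pySetD_natCast, List.set_set]
    simp

theorem pv_loc2 {α γ : Type} (xs : List α) (n m : Nat) (hne : m ≠ n) (d : γ) (f : γ → γ → α → γ) :
    ∀ (dp : List γ), n < dp.length → m < dp.length →
    xs.foldl (fun dp x => PySem.List.pySetD dp (n:Int) (f (PySem.List.pyGetD dp (n:Int) d) (PySem.List.pyGetD dp (m:Int) d) x)) dp
      = PySem.List.pySetD dp (n:Int) (xs.foldl (fun c x => f c (PySem.List.pyGetD dp (m:Int) d) x) (PySem.List.pyGetD dp (n:Int) d)) := by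
  induction xs with
  | nil => intro dp hn hm; simpa using (pv_setSelf dp n d hn).symm
  | cons x xs ih =>
    intro dp hn hm
    simp only [List.foldl_cons]
    rw [ih _ (by rw [PySem.List.length_pySetD]; exact hn) (by rw [PySem.List.length_pySetD]; exact hm)]
    rw [PySem.List.pyGetD_pySetD_natCast _ _ _ _ _ hn, PySem.List.pyGetD_pySetD_natCast _ _ _ _ _ hn]
    simp only [if_neg hne, PySem.List.pySetD_natCast, List.set_set]
    simp

theorem pv_foldl_congr_inv {α γ : Type} (l : List α) (f g : γ → α → γ) (inv : γ → Prop)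
    (init : γ) (h0 : inv init)
    (h : ∀ acc x, inv acc → f acc x = g acc x ∧ inv (g acc x)) :
    l.foldl f init = l.foldl g init := by
  induction l generalizing init with
  | nil => rfl
  | cons x xs ih =>
    simp only [List.foldl_cons]
    rw [(h init x h0).1, ih _ (h init x h0).2]

theorem pv_set_map_range {γ : Type} (f : Nat → γ) (nn i : Nat) (v : γ) (_h : i < nn) :
    ((List.range nn).map f).set i v = (List.range nn).map (fun j => if j = i then v else f j) := by
  apply List.ext_getElem
  · simp
  · intro k h1 h2
    simp only [List.getElem_set, List.getElem_map, List.getElem_range]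
    rcases eq_or_ne i k with hk | hk
    · simp [hk]
    · simp [hk, Ne.symm hk]

theorem pv_iter {γ : Type} {α : Type} (h : γ → γ) (l : List α) (init : γ) :
    l.foldl (fun r _ => h r) init = h^[l.length] init := by
  induction l generalizing init with
  | nil => rfl
  | cons x xs ih => simp only [List.foldl_cons, List.length_cons, ih, Function.iterate_succ_apply]

theorem pv_mod_eq (x : Int) : PySem.Int.mod x (10^9+7) = x % (10^9+7) :=
  PySem.Int.mod_eq_emod_of_pos (by norm_num)

theorem pv_rows_getD0 (b i : Nat) : (pvRows b i).getD 0 0 = 0 := by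
  cases i with
  | zero =>
    rw [pvRows]
    simp only [Function.iterate_zero_apply, pvBase]
    rw [PySem.List.getD_map_range _ _ _ _ (by omega)]
    simp
  | succ n =>
    rw [pvRows, Function.iterate_succ_apply']
    simp only [pvStep]
    rw [PySem.List.getD_map_range _ _ _ _ (by omega)]
    simp

theorem pv_w_eq (r : List Int) (n : Nat) : pvW r n = pvPre r (n+1) - pvPre r (n+1-10) := by
  unfold pvW pvPre
  by_cases h : 9 ≤ n
  · rw [← Finset.sum_Ico_eq_sub (fun t => r.getD t 0) (by omega : n+1-10 ≤ n+1)]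
    rw [Finset.sum_Ico_eq_sum_range]
    rw [show (n+1)-(n+1-10) = 10 from by omega]
    calc (∑ k ∈ Finset.range 10, if k ≤ n then r.getD (n-k) 0 else 0)
        = ∑ k ∈ Finset.range 10, r.getD (n-k) 0 :=
          Finset.sum_congr rfl (fun k hk => if_pos (by simp only [Finset.mem_range] at hk; omega))
      _ = ∑ j ∈ Finset.range 10, r.getD (n-(10-1-j)) 0 :=
          (Finset.sum_range_reflect (fun k => r.getD (n-k) 0) 10).symm
      _ = ∑ j ∈ Finset.range 10, r.getD ((n+1-10)+j) 0 :=
          Finset.sum_congr rfl (fun j hj => by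
            congr 1
            simp only [Finset.mem_range] at hj
            omega)
  · rw [show n+1-10 = 0 from by omega]
    simp only [Finset.sum_range_zero, sub_zero]
    have hsplit : (∑ k ∈ Finset.range 10, if k ≤ n then r.getD (n-k) 0 else 0)
        = (∑ k ∈ Finset.Ico 0 (n+1), if k ≤ n then r.getD (n-k) 0 else 0)
          + ∑ k ∈ Finset.Ico (n+1) 10, if k ≤ n then r.getD (n-k) 0 else 0 := by
      rw [Finset.sum_Ico_consecutive _ (by omega) (by omega), Finset.range_eq_Ico]
    rw [hsplit]
    have h2 : (∑ k ∈ Finset.Ico (n+1) 10, if k ≤ n then r.getD (n-k) 0 else 0) = 0 :=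
      Finset.sum_eq_zero (fun k hk => if_neg (by simp only [Finset.mem_Ico] at hk; omega))
    have h1 : (∑ k ∈ Finset.Ico 0 (n+1), if k ≤ n then r.getD (n-k) 0 else 0)
        = ∑ k ∈ Finset.range (n+1), r.getD (n-k) 0 := by
      rw [← Finset.range_eq_Ico]
      exact Finset.sum_congr rfl (fun k hk => if_pos (by simp only [Finset.mem_range] at hk; omega))
    rw [h1, h2, add_zero]
    calc (∑ k ∈ Finset.range (n+1), r.getD (n-k) 0)
        = ∑ j ∈ Finset.range (n+1), r.getD ((n+1)-1-j) 0 :=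
          rfl
      _ = ∑ j ∈ Finset.range (n+1), r.getD j 0 :=
          Finset.sum_range_reflect (fun t => r.getD t 0) (n+1)

theorem pv_wsucc (r : List Int) (n : Nat) :
    pvW r (n+1) = pvW r n + r.getD (n+1) 0 - (if 10 ≤ n+1 then r.getD (n+1-10) 0 else 0) := by
  rw [pv_w_eq, pv_w_eq]
  by_cases h : 10 ≤ n+1
  · rw [if_pos h]
    rw [show n+1+1-10 = (n+1-10)+1 from by omega]
    unfold pvPre
    rw [Finset.sum_range_succ (fun t => r.getD t 0) (n+1),
        Finset.sum_range_succ (fun t => r.getD t 0) (n+1-10)]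
    ring
  · rw [if_neg h]
    rw [show n+1+1-10 = 0 from by omega, show n+1-10 = 0 from by omega]
    unfold pvPre
    rw [Finset.sum_range_succ (fun t => r.getD t 0) (n+1)]
    ring

theorem pv_w_zero (r : List Int) (h0 : r.getD 0 0 = 0) : pvW r 0 = 0 := by
  unfold pvW
  have : ∀ k ∈ Finset.range 10, (if k ≤ 0 then r.getD (0-k) 0 else 0) = (if k = 0 then r.getD (0-k) 0 else 0) := by
    intro k _
    congr 1
    simp
  rw [Finset.sum_congr rfl this, Finset.sum_ite_eq' (Finset.range 10) 0 (fun k => r.getD (0-k) 0)]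
  simpa using h0

theorem pv_cell_aux (r : List Int) (j : Nat) : ∀ (t : Nat), t ≤ 10 →
    (PySem.List.pyRange 0 (t:Int) 1).foldl
      (fun v k => if (j:Int) - k ≥ 0 then (v + PySem.List.pyGetD r ((j:Int)-k) 0) % (10^9+7) else v) 0
    = (∑ k ∈ Finset.range t, if k ≤ j then r.getD (j-k) 0 else 0) % (10^9+7) := by
  intro t
  induction t with
  | zero => intro _; simp [PySem.List.pyRange_one_eq_nil]
  | succ t ih =>
    intro ht
    rw [show ((t+1:Nat):Int) = (t:Int)+1 from by push_cast; ring]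
    rw [PySem.List.pyRange_one_succ_right (by omega : (0:Int) ≤ (t:Int))]
    rw [List.foldl_append]
    rw [ih (by omega)]
    simp only [List.foldl_cons, List.foldl_nil]
    rw [Finset.sum_range_succ]
    by_cases hc : t ≤ j
    · rw [if_pos (by omega : (j:Int) - (t:Int) ≥ 0), if_pos hc]
      rw [show (j:Int)-(t:Int) = ((j-t:Nat):Int) from by omega]
      rw [PySem.List.pyGetD_natCast]
      rw [Int.emod_add_emod]
    · rw [if_neg (by omega : ¬ ((j:Int) - (t:Int) ≥ 0)), if_neg hc, add_zero]

def pvKRow (c : List Int) (r : List Int) (j : Int) : List Int :=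
  (PySem.List.pyRange 0 10 1).foldl
    (fun c k => if j - k ≥ 0 then
        PySem.List.pySetD c j ((PySem.List.pyGetD c j 0 + PySem.List.pyGetD r (j-k) 0) % (10^9+7))
      else c) c

theorem pv_cell (r : List Int) (j : Nat) :
    (PySem.List.pyRange 0 10 1).foldl
      (fun v k => if (j:Int) - k ≥ 0 then (v + PySem.List.pyGetD r ((j:Int)-k) 0) % (10^9+7) else v) 0
    = pvW r j % (10^9+7) := by
  have h := pv_cell_aux r j 10 (le_refl 10)
  unfold pvW
  rw [show ((10:Nat):Int) = (10:Int) from by norm_num] at h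
  exact h

theorem pv_first (b : Nat) : ∀ (t : Nat), t ≤ b+1 →
    (PySem.List.pyRange 1 (t:Int) 1).foldl (fun r i => PySem.List.pySetD r i 1) (pvZ b)
    = (List.range (b+1)).map (fun j => if 1 ≤ j ∧ j < t then (1:Int) else 0) := by
  intro t
  induction t with
  | zero =>
    intro _
    rw [PySem.List.pyRange_one_eq_nil (by simp : ((0:Nat):Int) ≤ 1)]
    simp only [List.foldl_nil, pvZ]
    apply List.map_congr_left
    intro j _
    have : ¬ (1 ≤ j ∧ j < 0) := by omega
    rw [if_neg this]
  | succ t ih =>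
    intro ht
    by_cases h0 : t = 0
    · subst h0
      rw [show ((1:Nat):Int) = (1:Int) from by norm_num]
      rw [PySem.List.pyRange_one_eq_nil (by omega : (1:Int) ≤ 1)]
      simp only [List.foldl_nil, pvZ]
      apply List.map_congr_left
      intro j _
      have : ¬ (1 ≤ j ∧ j < 1) := by omega
      rw [if_neg this]
    · rw [show ((t+1:Nat):Int) = (t:Int)+1 from by push_cast; ring]
      rw [PySem.List.pyRange_one_succ_right (by omega : (1:Int) ≤ (t:Int))]
      rw [List.foldl_append, ih (by omega)]
      simp only [List.foldl_cons, List.foldl_nil]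
      rw [PySem.List.pySetD_natCast, pv_set_map_range _ _ _ _ (by omega : t < b+1)]
      apply List.map_congr_left
      intro j _
      by_cases hj : j = t
      · subst hj
        rw [if_pos rfl, if_pos (by omega)]
      · rw [if_neg hj]
        by_cases hj2 : 1 ≤ j ∧ j < t
        · rw [if_pos hj2, if_pos (by omega)]
        · rw [if_neg hj2, if_neg (by omega)]

theorem pv_rowA (b : Nat) (r : List Int) : ∀ (m : Nat), m ≤ b →
    (PySem.List.pyRange 1 ((1+m:Nat):Int) 1).foldl (fun c j => pvKRow c r j) (pvZ b)
    = (List.range (b+1)).map (fun j => if 1 ≤ j ∧ j ≤ m then pvW r j % (10^9+7) else 0) := by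
  intro m
  induction m with
  | zero =>
    intro _
    rw [show ((1+0:Nat):Int) = (1:Int) from by norm_num]
    rw [PySem.List.pyRange_one_eq_nil (by omega : (1:Int) ≤ 1)]
    simp only [List.foldl_nil, pvZ]
    apply List.map_congr_left
    intro j _
    have : ¬ (1 ≤ j ∧ j ≤ 0) := by omega
    rw [if_neg this]
  | succ m ih =>
    intro hm
    rw [show ((1+(m+1):Nat):Int) = ((1+m:Nat):Int)+1 from by push_cast; ring]
    rw [PySem.List.pyRange_one_succ_right (by omega : (1:Int) ≤ ((1+m:Nat):Int))]
    rw [List.foldl_append, ih (by omega)]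
    simp only [List.foldl_cons, List.foldl_nil]
    rw [show ((1+m:Nat):Int) = ((m+1:Nat):Int) from by push_cast; ring]
    set part := (List.range (b+1)).map (fun j => if 1 ≤ j ∧ j ≤ m then pvW r j % (10^9+7) else 0) with hpart
    have hlen : part.length = b+1 := by rw [hpart]; simp
    unfold pvKRow
    rw [pv_foldl_congr_inv _ _
      (fun c k => PySem.List.pySetD c ((m+1:Nat):Int)
        (if ((m+1:Nat):Int) - k ≥ 0 then
          (PySem.List.pyGetD c ((m+1:Nat):Int) 0 + PySem.List.pyGetD r (((m+1:Nat):Int)-k) 0) % (10^9+7)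
        else PySem.List.pyGetD c ((m+1:Nat):Int) 0))
      (fun c => c.length = b+1) _ hlen ?hcong]
    case hcong =>
      intro acc k hinv
      dsimp only
      constructor
      · by_cases hc : ((m+1:Nat):Int) - k ≥ 0
        · rw [if_pos hc, if_pos hc]
        · rw [if_neg hc, if_neg hc, pv_setSelf _ _ _ (by omega)]
      · rw [PySem.List.length_pySetD]; exact hinv
    rw [pv_loc1 _ (m+1) 0
      (fun v k => if ((m+1:Nat):Int) - k ≥ 0 then (v + PySem.List.pyGetD r (((m+1:Nat):Int)-k) 0) % (10^9+7) else v)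
      part (by omega)]
    rw [PySem.List.pyGetD_natCast, hpart, PySem.List.getD_map_range _ _ _ _ (by omega : m+1 < b+1)]
    rw [if_neg (by omega : ¬ (1 ≤ m+1 ∧ m+1 ≤ m))]
    rw [pv_cell r (m+1)]
    rw [PySem.List.pySetD_natCast, pv_set_map_range _ _ _ _ (by omega : m+1 < b+1)]
    apply List.map_congr_left
    intro j _
    by_cases hj : j = m+1
    · subst hj
      rw [if_pos rfl, if_pos (by omega)]
    · rw [if_neg hj]
      by_cases hj2 : 1 ≤ j ∧ j ≤ m
      · rw [if_pos hj2, if_pos (by omega)]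
      · rw [if_neg hj2, if_neg (by omega)]

def pvBodyA (b : Nat) : List (List Int) → Int → List (List Int) := fun dp i =>
  (PySem.List.pyRange 1 ((b:Int)+1) 1).foldl (fun dp j =>
    (PySem.List.pyRange 0 10 1).foldl (fun dp k =>
      if j - k ≥ 0 then
        PySem.List.pySetD dp i (PySem.List.pySetD (PySem.List.pyGetD dp i []) j
          ((PySem.List.pyGetD (PySem.List.pyGetD dp i []) j 0
            + PySem.List.pyGetD (PySem.List.pyGetD dp (i-1) []) (j-k) 0) % (10^9+7)))
      else dp) dp) dp

theorem pv_tbl_len (a b i : Nat) : (pvTbl a b i).length = a := by simp [pvTbl]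

theorem pv_tbl_get_hi (a b i t : Nat) (ht : t < a) (hit : i < t) :
    PySem.List.pyGetD (pvTbl a b i) (t:Int) [] = pvZ b := by
  rw [PySem.List.pyGetD_natCast, pvTbl, PySem.List.getD_map_range _ _ _ _ ht,
    if_neg (by omega)]

theorem pv_tbl_get_lo (a b i t : Nat) (ht : t < a) (hit : t ≤ i) :
    PySem.List.pyGetD (pvTbl a b i) (t:Int) [] = pvRows b t := by
  rw [PySem.List.pyGetD_natCast, pvTbl, PySem.List.getD_map_range _ _ _ _ ht, if_pos hit]

theorem pv_bodyA_step (a b i : Nat) (hia : i+1 < a) :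
    pvBodyA b (pvTbl a b i) ((i+1:Nat):Int) = pvTbl a b (i+1) := by
  unfold pvBodyA
  rw [show ((i+1:Nat):Int) - 1 = ((i:Nat):Int) from by push_cast; ring]
  -- step 1: rewrite the j-fold body (a k-fold over the table) into row-update form
  rw [pv_foldl_congr_inv _ _
    (fun dp j => PySem.List.pySetD dp ((i+1:Nat):Int)
      (pvKRow (PySem.List.pyGetD dp ((i+1:Nat):Int) []) (PySem.List.pyGetD dp ((i:Nat):Int) []) j))
    (fun dp => dp.length = a) _ (pv_tbl_len a b i) ?hcong]
  case hcong =>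
    intro dp j hinv
    dsimp only
    constructor
    · -- k-fold on table = set row (i+1) to pvKRow
      rw [pv_foldl_congr_inv _ _
        (fun dp k => PySem.List.pySetD dp ((i+1:Nat):Int)
          (if j - k ≥ 0 then
            PySem.List.pySetD (PySem.List.pyGetD dp ((i+1:Nat):Int) []) j
              ((PySem.List.pyGetD (PySem.List.pyGetD dp ((i+1:Nat):Int) []) j 0
                + PySem.List.pyGetD (PySem.List.pyGetD dp ((i:Nat):Int) []) (j-k) 0) % (10^9+7))
          else PySem.List.pyGetD dp ((i+1:Nat):Int) []))
        (fun dp => dp.length = a) _ hinv ?hc2]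
      case hc2 =>
        intro acc k hinv2
        dsimp only
        constructor
        · by_cases hck : j - k ≥ 0
          · rw [if_pos hck, if_pos hck]
          · rw [if_neg hck, if_neg hck, pv_setSelf _ _ _ (by omega)]
        · rw [PySem.List.length_pySetD]; exact hinv2
      rw [pv_loc2 _ (i+1) i (by omega) []
        (fun c r' k => if j - k ≥ 0 then
            PySem.List.pySetD c j
              ((PySem.List.pyGetD c j 0 + PySem.List.pyGetD r' (j-k) 0) % (10^9+7))
          else c)
        dp (by omega) (by omega)]
      rfl
    · rw [PySem.List.length_pySetD]; exact hinv
  -- step 2: the j-fold in row-update form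
  rw [pv_loc2 _ (i+1) i (by omega) [] (fun c r' j => pvKRow c r' j)
    (pvTbl a b i) (by rw [pv_tbl_len]; omega) (by rw [pv_tbl_len]; omega)]
  rw [pv_tbl_get_hi a b i (i+1) hia (by omega), pv_tbl_get_lo a b i i (by omega) (by omega)]
  rw [show ((b:Int)+1) = ((1+b:Nat):Int) from by push_cast; ring]
  rw [pv_rowA b (pvRows b i) b (le_refl b)]
  have hrows : (List.range (b+1)).map (fun j => if 1 ≤ j ∧ j ≤ b then pvW (pvRows b i) j % (10^9+7) else 0)
      = pvRows b (i+1) := by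
    conv_rhs => rw [pvRows, Function.iterate_succ_apply']
    rfl
  rw [hrows]
  rw [PySem.List.pySetD_natCast, pvTbl, pv_set_map_range _ _ _ _ (by omega : i+1 < a)]
  apply List.map_congr_left
  intro t _
  by_cases ht : t = i+1
  · subst ht
    rw [if_pos rfl, if_pos (by omega)]
  · rw [if_neg ht]
    by_cases ht2 : t ≤ i
    · rw [if_pos ht2, if_pos (by omega)]
    · rw [if_neg ht2, if_neg (by omega)]

theorem pv_mainA (a b : Nat) : ∀ i, i < a →
    (PySem.List.pyRange 1 ((1+i:Nat):Int) 1).foldl (pvBodyA b) (pvTbl a b 0) = pvTbl a b i := by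
  intro i
  induction i with
  | zero =>
    intro _
    rw [show ((1+0:Nat):Int) = (1:Int) from by norm_num]
    rw [PySem.List.pyRange_one_eq_nil (by omega : (1:Int) ≤ 1)]
    rfl
  | succ i ih =>
    intro hi
    rw [show ((1+(i+1):Nat):Int) = ((1+i:Nat):Int)+1 from by push_cast; ring]
    rw [PySem.List.pyRange_one_succ_right (by omega : (1:Int) ≤ ((1+i:Nat):Int))]
    rw [List.foldl_append, ih (by omega)]
    simp only [List.foldl_cons, List.foldl_nil]
    rw [show ((1+i:Nat):Int) = ((i+1:Nat):Int) from by push_cast; ring]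
    exact pv_bodyA_step a b i hi

set_option maxHeartbeats 1000000 in
theorem pv_solveA (a b : Nat) (ha : 1 ≤ a) :
    solve (a:Int) (b:Int) = (pvRows b (a-1)).getD b 0 % (10^9+7) := by
  unfold solve
  simp only [pv_mod_eq]
  have einit : (List.map (fun _ => List.map (fun _ => (0:Int)) (PySem.List.pyRange 0 ((b:Int)+1) 1))
      (PySem.List.pyRange 0 (a:Int) 1)) = (List.range a).map (fun _ => pvZ b) := by
    rw [show ((b:Int)+1) = ((b+1:Nat):Int) from by push_cast; ring]
    rw [PySem.List.pyRange_zero_nat, PySem.List.pyRange_zero_nat, List.map_map, List.map_map]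
    rfl
  rw [einit]
  have h1 := pv_loc1 (PySem.List.pyRange 1 (min 10 ((b:Int)+1)) 1) 0 ([] : List Int)
    (fun r i => PySem.List.pySetD r i 1) ((List.range a).map (fun _ => pvZ b)) (by simp; omega)
  simp only [Nat.cast_zero] at h1
  rw [h1]
  have h2 : PySem.List.pyGetD ((List.range a).map (fun _ => pvZ b)) 0 [] = pvZ b := by
    have h := PySem.List.pyGetD_natCast ((List.range a).map (fun _ => pvZ b)) 0 ([]:List Int)
    simp only [Nat.cast_zero] at h
    rw [h, PySem.List.getD_map_range _ _ _ _ (by omega : 0 < a)]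
  rw [h2]
  have h3 := pv_first b (min 10 (b+1)) (by omega)
  rw [show ((min 10 (b+1) : Nat):Int) = min (10:Int) ((b:Int)+1) from by push_cast; rfl] at h3
  rw [h3]
  have hbase : (List.range (b+1)).map (fun j => if 1 ≤ j ∧ j < min 10 (b+1) then (1:Int) else 0) = pvBase b := by
    unfold pvBase
    apply List.map_congr_left
    intro j hj
    simp only [List.mem_range] at hj
    have : (1 ≤ j ∧ j < min 10 (b+1)) ↔ (1 ≤ j ∧ j < 10) := by omega
    simp only [this]
  rw [hbase]
  have h4 := PySem.List.pySetD_natCast ((List.range a).map (fun _ => pvZ b)) 0 (pvBase b)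
  simp only [Nat.cast_zero] at h4
  rw [h4, pv_set_map_range _ _ _ _ (by omega : 0 < a)]
  have h5 : (List.range a).map (fun t => if t = 0 then pvBase b else pvZ b) = pvTbl a b 0 := by
    unfold pvTbl
    apply List.map_congr_left
    intro t _
    by_cases ht : t = 0
    · subst ht; rw [if_pos rfl, if_pos (by omega)]; rfl
    · rw [if_neg ht, if_neg (by omega)]
  rw [h5]
  rw [show (a:Int) - 1 = ((a-1:Nat):Int) from by push_cast [ha]; ring]
  rw [show (a:Int) = ((1+(a-1):Nat):Int) from by push_cast [ha]; ring]
  rw [show (fun (dp : List (List Int)) (i : Int) =>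
      List.foldl (fun dp j =>
        List.foldl (fun dp k =>
          if j - k ≥ 0 then
            PySem.List.pySetD dp i (PySem.List.pySetD (PySem.List.pyGetD dp i []) j
              ((PySem.List.pyGetD (PySem.List.pyGetD dp i []) j 0 +
                  PySem.List.pyGetD (PySem.List.pyGetD dp (i - 1) []) (j - k) 0) %
                (10 ^ 9 + 7)))
          else dp)
          dp (PySem.List.pyRange 0 10 1))
        dp (PySem.List.pyRange 1 ((b:Int) + 1) 1)) = pvBodyA b from rfl]
  rw [pv_mainA a b (a-1) (by omega)]
  rw [pv_tbl_get_lo a b (a-1) (a-1) (by omega) (le_refl _)]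
  rw [PySem.List.pyGetD_natCast]

theorem pv_innerAux (b : Nat) (r : List Int) (h0 : r.getD 0 0 = 0) : ∀ m, m ≤ b →
    (PySem.List.pyRange 1 ((1+m:Nat):Int) 1).foldl
      (fun (s : List Int × Int) j =>
        (PySem.List.pySetD s.1 j
          ((if j ≥ 10 then s.2 + PySem.List.pyGetD r j 0 - PySem.List.pyGetD r (j-10) 0
            else s.2 + PySem.List.pyGetD r j 0) % (10^9+7)),
         if j ≥ 10 then s.2 + PySem.List.pyGetD r j 0 - PySem.List.pyGetD r (j-10) 0
         else s.2 + PySem.List.pyGetD r j 0))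
      (pvZ b, 0)
    = ((List.range (b+1)).map (fun j => if 1 ≤ j ∧ j ≤ m then pvW r j % (10^9+7) else 0), pvW r m) := by
  intro m
  induction m with
  | zero =>
    intro _
    rw [show ((1+0:Nat):Int) = (1:Int) from by norm_num]
    rw [PySem.List.pyRange_one_eq_nil (by omega : (1:Int) ≤ 1)]
    simp only [List.foldl_nil]
    rw [pv_w_zero r h0]
    have hz : (List.range (b+1)).map (fun j => if 1 ≤ j ∧ j ≤ 0 then pvW r j % (10^9+7) else (0:Int)) = pvZ b := by
      unfold pvZ
      apply List.map_congr_left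
      intro j _
      rw [if_neg (by omega)]
    rw [hz]
  | succ m ih =>
    intro hm
    rw [show ((1+(m+1):Nat):Int) = ((1+m:Nat):Int)+1 from by push_cast; ring]
    rw [PySem.List.pyRange_one_succ_right (by omega : (1:Int) ≤ ((1+m:Nat):Int))]
    rw [List.foldl_append, ih (by omega)]
    simp only [List.foldl_cons, List.foldl_nil]
    rw [show ((1+m:Nat):Int) = ((m+1:Nat):Int) from by push_cast; ring]
    have hw : (if ((m+1:Nat):Int) ≥ 10 then
          pvW r m + PySem.List.pyGetD r ((m+1:Nat):Int) 0 - PySem.List.pyGetD r (((m+1:Nat):Int)-10) 0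
        else pvW r m + PySem.List.pyGetD r ((m+1:Nat):Int) 0) = pvW r (m+1) := by
      by_cases hc : 10 ≤ m+1
      · rw [if_pos (by omega : ((m+1:Nat):Int) ≥ 10)]
        rw [show ((m+1:Nat):Int)-10 = ((m+1-10:Nat):Int) from by omega]
        rw [PySem.List.pyGetD_natCast, PySem.List.pyGetD_natCast]
        rw [pv_wsucc r m, if_pos hc]
      · rw [if_neg (by omega : ¬ (((m+1:Nat):Int) ≥ 10))]
        rw [PySem.List.pyGetD_natCast]
        rw [pv_wsucc r m, if_neg hc, sub_zero]
    rw [hw]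
    rw [PySem.List.pySetD_natCast, pv_set_map_range _ _ _ _ (by omega : m+1 < b+1)]
    have hmap : (List.range (b+1)).map
        (fun j => if j = m+1 then pvW r (m+1) % (10^9+7) else if 1 ≤ j ∧ j ≤ m then pvW r j % (10^9+7) else 0)
        = (List.range (b+1)).map (fun j => if 1 ≤ j ∧ j ≤ m+1 then pvW r j % (10^9+7) else 0) := by
      apply List.map_congr_left
      intro j _
      by_cases hj : j = m+1
      · subst hj; rw [if_pos rfl, if_pos (by omega)]
      · rw [if_neg hj]
        by_cases hj2 : 1 ≤ j ∧ j ≤ m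
        · rw [if_pos hj2, if_pos (by omega)]
        · rw [if_neg hj2, if_neg (by omega)]
    rw [hmap]

def pvInnerB (b : Nat) (r : List Int) : List Int :=
  ((PySem.List.pyRange 1 ((b:Int)+1) 1).foldl
      (fun (s : List Int × Int) j =>
        (PySem.List.pySetD s.1 j
          ((if j ≥ 10 then s.2 + PySem.List.pyGetD r j 0 - PySem.List.pyGetD r (j-10) 0
            else s.2 + PySem.List.pyGetD r j 0) % (10^9+7)),
         if j ≥ 10 then s.2 + PySem.List.pyGetD r j 0 - PySem.List.pyGetD r (j-10) 0
         else s.2 + PySem.List.pyGetD r j 0))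
      (pvZ b, 0)).1

theorem pv_innerB_eq (b : Nat) (r : List Int) (h0 : r.getD 0 0 = 0) :
    pvInnerB b r = pvStep b r := by
  unfold pvInnerB
  rw [show ((b:Int)+1) = ((1+b:Nat):Int) from by push_cast; ring]
  rw [pv_innerAux b r h0 b (le_refl b)]
  rfl

theorem pv_iterB (b : Nat) : ∀ i, (pvInnerB b)^[i] (pvBase b) = pvRows b i := by
  intro i
  induction i with
  | zero => rfl
  | succ i ih =>
    rw [Function.iterate_succ_apply', ih, pv_innerB_eq b _ (pv_rows_getD0 b i)]
    conv_rhs => rw [pvRows, Function.iterate_succ_apply']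
    rfl

set_option maxHeartbeats 1000000 in
theorem pv_solveB (a b : Nat) (ha : 1 ≤ a) :
    solve_alt (a:Int) (b:Int) = (pvRows b (a-1)).getD b 0 % (10^9+7) := by
  unfold solve_alt
  simp only [pv_mod_eq]
  have hrep : PySem.List.pyRepeat [(0:Int)] ((b:Int)+1) = pvZ b := by
    rw [PySem.List.pyRepeat_singleton, show ((b:Int)+1).toNat = b+1 from by omega]
    unfold pvZ
    simp [List.map_const']
  simp only [hrep]
  show PySem.List.pyGetD
      (List.foldl (fun row (_ : Int) => pvInnerB b row)
        (List.foldl (fun row d => PySem.List.pySetD row d 1) (pvZ b)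
          (PySem.List.pyRange 1 (min 10 ((b:Int)+1)) 1))
        (PySem.List.pyRange 0 ((a:Int)-1) 1))
      ((b:Int)) 0 % (10^9+7)
    = (pvRows b (a-1)).getD b 0 % (10^9+7)
  have h3 := pv_first b (min 10 (b+1)) (by omega)
  rw [show ((min 10 (b+1) : Nat):Int) = min (10:Int) ((b:Int)+1) from by push_cast; rfl] at h3
  rw [h3]
  have hbase : (List.range (b+1)).map (fun j => if 1 ≤ j ∧ j < min 10 (b+1) then (1:Int) else 0) = pvBase b := by
    unfold pvBase
    apply List.map_congr_left
    intro j hj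
    simp only [List.mem_range] at hj
    have : (1 ≤ j ∧ j < min 10 (b+1)) ↔ (1 ≤ j ∧ j < 10) := by omega
    simp only [this]
  rw [hbase]
  rw [pv_iter (pvInnerB b)]
  rw [PySem.List.length_pyRange_one]
  rw [show (((a:Int)-1)-0).toNat = a-1 from by omega]
  rw [pv_iterB b (a-1)]
  rw [PySem.List.pyGetD_natCast]

-- ===== VERDICT (by name: the statement is the Claim_ definition above) =====
theorem solve_spec : Claim_equal_solve := by
  intro A B _ hpre
  unfold Pre_solve at hpre
  unfold Spec_solve
  have ha : A = ((A.toNat : Nat) : Int) := (Int.toNat_of_nonneg (by omega)).symm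
  have hb : B = ((B.toNat : Nat) : Int) := (Int.toNat_of_nonneg (by omega)).symm
  rw [ha, hb, pv_solveA _ _ (by omega), pv_solveB _ _ (by omega)]
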